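-- pv_equiv track=rewrite | github.com/IgrMd/yandex-algos-training | Тренировки по алгоритмам 1.0/Лекция 8. «Деревья»/B.py | tree_heights
-- ===== SOURCE A (Python) =====
-- from dataclasses import dataclass
--
-- @dataclass
-- class Node:
--     value: int = None
--     left: any = None
--     right: any = None
--
-- def add(root: Node, key: int, curr_height: int) -> int:
--     if key == root.value:
--         return -1
--     if key < root.value:
--         if root.left is None:
--             root.left = Node(value=key)
--             return curr_height + 1
--         else:
--             return add(root.left, key, curr_height + 1)
--     if key > root.value:
--         if root.right is None:
--             root.right = Node(value=key)
--             return curr_height + 1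
--         else:
--             return add(root.right, key, curr_height + 1)
--
-- def tree_heights(items: list):
--     root = Node(value=items[0])
--     heights = [1]
--     for item in items:
--         if item == 0:
--             break
--         curr_height = add(root, item, 1)
--         if curr_height != -1:
--             heights.append(curr_height)
--     return heights
-- ===== SOURCE B (Python) =====
-- def tree_heights(items: list):
--     # Same BST insertion depths, but without building a tree: keep the inserted
--     # keys in a sorted list with a depth map; a new key's depth is
--     # 1 + max(depth of predecessor, depth of successor) (its BST parent is one
--     # of the two neighbours), found by hand-rolled binary search.
--     first = items[0]
--     depth = {first: 1}
--     keys = [first]  # sorted list of inserted keys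
--     heights = [1]
--     for item in items:
--         if item == 0:
--             break
--         if item in depth:
--             continue
--         lo, hi = 0, len(keys)
--         while lo < hi:
--             mid = (lo + hi) // 2
--             if keys[mid] < item:
--                 lo = mid + 1
--             else:
--                 hi = mid
--         dl = depth[keys[lo - 1]] if lo > 0 else 0
--         dr = depth[keys[lo]] if lo < len(keys) else 0
--         d = 1 + max(dl, dr)
--         depth[item] = d
--         keys.insert(lo, item)
--         heights.append(d)
--     return heights
-- ===== Notes on version B (the rewrite author's own statement) =====
-- stated objective: alternative
-- what changed: B builds no tree at all: it keeps the inserted keys in a sorted list plus a key->depth dict and computes each new key's insertion depth as 1 + max(depth(predecessor), depth(successor)) found by binary search, instead of A's recursive descent through a mutable node structure.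
import Mathlib
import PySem

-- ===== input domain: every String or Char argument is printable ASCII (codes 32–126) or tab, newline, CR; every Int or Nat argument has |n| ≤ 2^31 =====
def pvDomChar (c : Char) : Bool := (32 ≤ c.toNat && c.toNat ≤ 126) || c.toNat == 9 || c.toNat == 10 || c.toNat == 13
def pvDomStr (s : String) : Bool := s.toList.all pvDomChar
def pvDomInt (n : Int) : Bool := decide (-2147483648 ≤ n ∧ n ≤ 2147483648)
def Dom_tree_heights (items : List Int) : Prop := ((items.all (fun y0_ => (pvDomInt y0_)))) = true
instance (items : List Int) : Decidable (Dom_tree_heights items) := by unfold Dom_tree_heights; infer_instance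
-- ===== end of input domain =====

-- B replaces A's recursive mutable-node BST by a sorted key list + depth dict
-- (new depth = 1 + max(depth(pred), depth(succ)) via binary search); equal output, no speed claim.

-- ===== PORT A =====
-- Python's Node tree: None ↦ .nil, Node(v, l, r) ↦ .node v l r
inductive ATree where
  | nil : ATree
  | node : Int → ATree → ATree → ATree
deriving DecidableEq, Repr

-- add(root, key, curr_height): mutation is modelled by returning the updated tree with the height
def addA : ATree → Int → Int → ATree × Int
  | .nil, _, _ => (.nil, -1)  -- unreachable: Python's add is only ever called on a Node
  | .node v l r, key, ch =>
    if key = v then (.node v l r, -1)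
    else if key < v then
      match l with
      | .nil => (.node v (.node key .nil .nil) r, ch + 1)
      | .node lv ll lr =>
        let p := addA (.node lv ll lr) key (ch + 1)
        (.node v p.1 r, p.2)
    else
      match r with
      | .nil => (.node v l (.node key .nil .nil), ch + 1)
      | .node rv rl rr =>
        let p := addA (.node rv rl rr) key (ch + 1)
        (.node v l p.1, p.2)

def loopA : List Int → ATree → List Int → List Int
  | [], _, hs => hs
  | item :: rest, t, hs =>
    if item = 0 then hs
    else
      let p := addA t item 1
      loopA rest p.1 (if p.2 ≠ -1 then hs ++ [p.2] else hs)

def tree_heights (items : List Int) : List Int :=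
  match items with
  | [] => []  -- Python raises IndexError on items[0]; excluded by Pre_
  | x :: _ => loopA items (.node x .nil .nil) [1]

-- ===== PORT B =====
-- the hand-rolled while-loop binary search of Source B (lo, hi Python ints)
def bisectB (keys : List Int) (x : Int) (lo hi : Int) : Int :=
  if h : lo < hi then
    if PySem.List.pyGetD keys (PySem.Int.floordiv (lo + hi) 2) 0 < x then
      bisectB keys x (PySem.Int.floordiv (lo + hi) 2 + 1) hi
    else bisectB keys x lo (PySem.Int.floordiv (lo + hi) 2)
  else lo
termination_by (hi - lo).toNat
decreasing_by
  · have h1 := (PySem.Int.floordiv_two_mid_bounds (le_of_lt h)).1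
    omega
  · have h1 := (PySem.Int.floordiv_two_mid_bounds (le_of_lt h)).1
    have h2 : PySem.Int.floordiv (lo + hi) 2 < hi := by
      rw [PySem.Int.floordiv_lt_iff_lt_mul (by omega)]; omega
    omega

-- keys[lo-1] / keys[lo] are always in range where Source B reads them, so pyGetD is exact there
def loopB : List Int → PySem.Dict Int Int → List Int → List Int → List Int
  | [], _, _, hs => hs
  | item :: rest, d, keys, hs =>
    if item = 0 then hs
    else if d.contains item then loopB rest d keys hs
    else
      let i := bisectB keys item 0 (keys.length : Int)
      let dl := if 0 < i then d.getD (PySem.List.pyGetD keys (i - 1) 0) 0 else 0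
      let dr := if i < (keys.length : Int) then d.getD (PySem.List.pyGetD keys i 0) 0 else 0
      let dep := 1 + max dl dr
      loopB rest (d.insert item dep) (PySem.List.insert keys i item) (hs ++ [dep])

def tree_heights_alt (items : List Int) : List Int :=
  match items with
  | [] => []  -- Python raises IndexError on items[0]; excluded by Pre_
  | first :: _ => loopB items (PySem.Dict.empty.insert first 1) [first] [1]

-- ===== PRECONDITION & SPEC =====
-- Pre_ excludes only the empty list, on which Python A raises IndexError (items[0]).
def Pre_tree_heights (items : List Int) : Prop := items ≠ []
instance (items : List Int) : Decidable (Pre_tree_heights items) := by unfold Pre_tree_heights; infer_instance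
def pvWitness_tree_heights : List Int := ([3, 1, 4, 1, 5, 0, 2])

def Spec_tree_heights (items : List Int) (out : List Int) : Prop := out = tree_heights_alt items
instance (items : List Int) (out : List Int) : Decidable (Spec_tree_heights items out) := by unfold Spec_tree_heights; infer_instance

-- ===== CLAIM (what is proved, stated in full; the proofs are below) =====
def Claim_equal_tree_heights : Prop := ∀ (items : List Int), Dom_tree_heights items → Pre_tree_heights items → Spec_tree_heights items (tree_heights items)

-- ===== LEMMAS AND PROOFS =====

-- keys stored in t, in symmetric order
def keysT : ATree → List Int
  | .nil => []
  | .node v l r => keysT l ++ v :: keysT r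

-- depth of x in t when the root has depth c (none if absent from the search path)
def depthIn : ATree → Int → Int → Option Int
  | .nil, _, _ => none
  | .node v l r, x, c => if x = v then some c else if x < v then depthIn l x (c + 1) else depthIn r x (c + 1)

-- depth of the predecessor of k in t (root depth c); 0 if k has no predecessor
def predD : ATree → Int → Int → Int
  | .nil, _, _ => 0
  | .node v l r, k, c =>
    if v < k then (if predD r k (c + 1) = 0 then c else predD r k (c + 1))
    else predD l k (c + 1)

def succD : ATree → Int → Int → Int
  | .nil, _, _ => 0
  | .node v l r, k, c =>
    if k < v then (if succD l k (c + 1) = 0 then c else succD l k (c + 1))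
    else succD r k (c + 1)

def LB : Option Int → Int → Prop
  | none, _ => True
  | some a, x => a < x

def UB : Option Int → Int → Prop
  | none, _ => True
  | some b, x => x < b

def BST : Option Int → Option Int → ATree → Prop
  | _, _, .nil => True
  | lo, hi, .node v l r => LB lo v ∧ UB hi v ∧ BST lo (some v) l ∧ BST (some v) hi r

theorem depthIn_nil (x c : Int) : depthIn .nil x c = none := rfl

theorem depthIn_node (v : Int) (l r : ATree) (x c : Int) :
    depthIn (.node v l r) x c =
      if x = v then some c else if x < v then depthIn l x (c + 1) else depthIn r x (c + 1) := rfl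

theorem predD_node (v : Int) (l r : ATree) (k c : Int) :
    predD (.node v l r) k c =
      if v < k then (if predD r k (c + 1) = 0 then c else predD r k (c + 1)) else predD l k (c + 1) := rfl

theorem succD_node (v : Int) (l r : ATree) (k c : Int) :
    succD (.node v l r) k c =
      if k < v then (if succD l k (c + 1) = 0 then c else succD l k (c + 1)) else succD r k (c + 1) := rfl

theorem addA_lt_nil (v : Int) (r : ATree) (k c : Int) (h1 : ¬ k = v) (h2 : k < v) :
    addA (.node v .nil r) k c = (.node v (.node k .nil .nil) r, c + 1) := by
  rw [addA.eq_def]; simp only [if_neg h1, if_pos h2]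

theorem addA_lt_node (v lv : Int) (ll lr r : ATree) (k c : Int) (h1 : ¬ k = v) (h2 : k < v) :
    addA (.node v (.node lv ll lr) r) k c =
      (.node v (addA (.node lv ll lr) k (c + 1)).1 r, (addA (.node lv ll lr) k (c + 1)).2) := by
  rw [addA.eq_def]; simp only [if_neg h1, if_pos h2]

theorem addA_gt_nil (v : Int) (l : ATree) (k c : Int) (h1 : ¬ k = v) (h2 : ¬ k < v) :
    addA (.node v l .nil) k c = (.node v l (.node k .nil .nil), c + 1) := by
  rw [addA.eq_def]; simp only [if_neg h1, if_neg h2]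

theorem addA_gt_node (v rv : Int) (rl rr l : ATree) (k c : Int) (h1 : ¬ k = v) (h2 : ¬ k < v) :
    addA (.node v l (.node rv rl rr)) k c =
      (.node v l (addA (.node rv rl rr) k (c + 1)).1, (addA (.node rv rl rr) k (c + 1)).2) := by
  rw [addA.eq_def]; simp only [if_neg h1, if_neg h2]

theorem addA_lt_nil_fst (v : Int) (r : ATree) (k c : Int) (h1 : ¬ k = v) (h2 : k < v) :
    (addA (.node v .nil r) k c).1 = .node v (.node k .nil .nil) r := by
  rw [addA_lt_nil v r k c h1 h2]

theorem addA_lt_nil_snd (v : Int) (r : ATree) (k c : Int) (h1 : ¬ k = v) (h2 : k < v) :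
    (addA (.node v .nil r) k c).2 = c + 1 := by
  rw [addA_lt_nil v r k c h1 h2]

theorem addA_lt_node_fst (v lv : Int) (ll lr r : ATree) (k c : Int) (h1 : ¬ k = v) (h2 : k < v) :
    (addA (.node v (.node lv ll lr) r) k c).1 = .node v (addA (.node lv ll lr) k (c + 1)).1 r := by
  rw [addA_lt_node v lv ll lr r k c h1 h2]

theorem addA_lt_node_snd (v lv : Int) (ll lr r : ATree) (k c : Int) (h1 : ¬ k = v) (h2 : k < v) :
    (addA (.node v (.node lv ll lr) r) k c).2 = (addA (.node lv ll lr) k (c + 1)).2 := by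
  rw [addA_lt_node v lv ll lr r k c h1 h2]

theorem addA_gt_nil_fst (v : Int) (l : ATree) (k c : Int) (h1 : ¬ k = v) (h2 : ¬ k < v) :
    (addA (.node v l .nil) k c).1 = .node v l (.node k .nil .nil) := by
  rw [addA_gt_nil v l k c h1 h2]

theorem addA_gt_nil_snd (v : Int) (l : ATree) (k c : Int) (h1 : ¬ k = v) (h2 : ¬ k < v) :
    (addA (.node v l .nil) k c).2 = c + 1 := by
  rw [addA_gt_nil v l k c h1 h2]

theorem addA_gt_node_fst (v rv : Int) (rl rr l : ATree) (k c : Int) (h1 : ¬ k = v) (h2 : ¬ k < v) :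
    (addA (.node v l (.node rv rl rr)) k c).1 = .node v l (addA (.node rv rl rr) k (c + 1)).1 := by
  rw [addA_gt_node v rv rl rr l k c h1 h2]

theorem addA_gt_node_snd (v rv : Int) (rl rr l : ATree) (k c : Int) (h1 : ¬ k = v) (h2 : ¬ k < v) :
    (addA (.node v l (.node rv rl rr)) k c).2 = (addA (.node rv rl rr) k (c + 1)).2 := by
  rw [addA_gt_node v rv rl rr l k c h1 h2]

theorem bst_mem_ub (t : ATree) : ∀ (lo hi : Option Int), BST lo hi t → ∀ x ∈ keysT t, UB hi x := by
  induction t with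
  | nil => intro lo hi _ x hx; simp [keysT] at hx
  | node v l r ihl ihr =>
    intro lo hi hb x hx
    obtain ⟨hlb, hub, hbl, hbr⟩ := hb
    simp only [keysT, List.mem_append, List.mem_cons] at hx
    rcases hx with hx | hx | hx
    · have hxv := ihl lo (some v) hbl x hx
      simp only [UB] at hxv
      cases hi with
      | none => trivial
      | some b => simp only [UB] at hub ⊢; omega
    · subst hx; exact hub
    · exact ihr (some v) hi hbr x hx

theorem bst_mem_lb (t : ATree) : ∀ (lo hi : Option Int), BST lo hi t → ∀ x ∈ keysT t, LB lo x := by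
  induction t with
  | nil => intro lo hi _ x hx; simp [keysT] at hx
  | node v l r ihl ihr =>
    intro lo hi hb x hx
    obtain ⟨hlb, hub, hbl, hbr⟩ := hb
    simp only [keysT, List.mem_append, List.mem_cons] at hx
    rcases hx with hx | hx | hx
    · exact ihl lo (some v) hbl x hx
    · subst hx; exact hlb
    · have hxv := ihr (some v) hi hbr x hx
      simp only [LB] at hxv
      cases lo with
      | none => trivial
      | some a => simp only [LB] at hlb ⊢; omega

theorem depthIn_mem (t : ATree) : ∀ (lo hi : Option Int) (x c : Int), BST lo hi t → x ∈ keysT t →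
    ∃ dv, depthIn t x c = some dv ∧ c ≤ dv := by
  induction t with
  | nil => intro lo hi x c _ hx; simp [keysT] at hx
  | node v l r ihl ihr =>
    intro lo hi x c hb hx
    obtain ⟨hlb, hub, hbl, hbr⟩ := hb
    simp only [keysT, List.mem_append, List.mem_cons] at hx
    rcases hx with hx | hx | hx
    · have hxv := bst_mem_ub l lo (some v) hbl x hx
      simp only [UB] at hxv
      obtain ⟨dv, hdv, hge⟩ := ihl lo (some v) x (c + 1) hbl hx
      exact ⟨dv, by simp only [depthIn, if_neg (by omega : ¬ x = v), if_pos hxv, hdv], by omega⟩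
    · subst hx; exact ⟨c, by simp [depthIn], le_refl c⟩
    · have hxv := bst_mem_lb r (some v) hi hbr x hx
      simp only [LB] at hxv
      obtain ⟨dv, hdv, hge⟩ := ihr (some v) hi x (c + 1) hbr hx
      exact ⟨dv, by simp only [depthIn, if_neg (by omega : ¬ x = v), if_neg (by omega : ¬ x < v), hdv], by omega⟩

theorem depthIn_notmem (t : ATree) : ∀ (x c : Int), x ∉ keysT t → depthIn t x c = none := by
  induction t with
  | nil => intro x c _; rfl
  | node v l r ihl ihr =>
    intro x c hx
    simp only [keysT, List.mem_append, List.mem_cons] at hx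
    push_neg at hx
    obtain ⟨h1, h2, h3⟩ := hx
    simp only [depthIn, if_neg h2]
    split
    · exact ihl x (c + 1) h1
    · exact ihr x (c + 1) h3

theorem addA_found (t : ATree) : ∀ (lo hi : Option Int) (k c : Int), BST lo hi t → k ∈ keysT t →
    addA t k c = (t, -1) := by
  induction t with
  | nil => intro lo hi k c _ hk; simp [keysT] at hk
  | node v l r ihl ihr =>
    intro lo hi k c hb hk
    obtain ⟨hlb, hub, hbl, hbr⟩ := hb
    simp only [keysT, List.mem_append, List.mem_cons] at hk
    rcases hk with hk | hk | hk
    · have hkv := bst_mem_ub l lo (some v) hbl k hk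
      simp only [UB] at hkv
      cases l with
      | nil => simp [keysT] at hk
      | node lv ll lr =>
        have ih := ihl lo (some v) k (c + 1) hbl hk
        rw [addA.eq_def]
        simp only [if_neg (by omega : ¬ k = v), if_pos hkv, ih]
    · subst hk; rw [addA.eq_def]; simp
    · have hkv := bst_mem_lb r (some v) hi hbr k hk
      simp only [LB] at hkv
      cases r with
      | nil => simp [keysT] at hk
      | node rv rl rr =>
        have ih := ihr (some v) hi k (c + 1) hbr hk
        rw [addA.eq_def]
        simp only [if_neg (by omega : ¬ k = v), if_neg (by omega : ¬ k < v), ih]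

theorem predD_ge (t : ATree) : ∀ (k c : Int), 1 ≤ c → predD t k c = 0 ∨ c ≤ predD t k c := by
  induction t with
  | nil => intro k c _; left; rfl
  | node v l r ihl ihr =>
    intro k c hc
    have hr := ihr k (c + 1) (by omega)
    have hl := ihl k (c + 1) (by omega)
    simp only [predD]
    split_ifs <;> omega

theorem succD_ge (t : ATree) : ∀ (k c : Int), 1 ≤ c → succD t k c = 0 ∨ c ≤ succD t k c := by
  induction t with
  | nil => intro k c _; left; rfl
  | node v l r ihl ihr =>
    intro k c hc
    have hr := ihr k (c + 1) (by omega)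
    have hl := ihl k (c + 1) (by omega)
    simp only [succD]
    split_ifs <;> omega

theorem predD_succD_ne (t : ATree) : ∀ (k c : Int), t ≠ .nil → k ∉ keysT t → 1 ≤ c →
    ¬(predD t k c = 0 ∧ succD t k c = 0) := by
  intro k c hne hk hc
  cases t with
  | nil => exact absurd rfl hne
  | node v l r =>
    simp only [keysT, List.mem_append, List.mem_cons] at hk
    push_neg at hk
    rcases lt_trichotomy k v with hkv | hkv | hkv
    · rintro ⟨-, hs⟩
      simp only [succD, if_pos hkv] at hs
      split at hs <;> omega
    · exact absurd hkv hk.2.1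
    · rintro ⟨hp, -⟩
      simp only [predD, if_pos hkv] at hp
      split at hp <;> omega

-- A's returned height is 1 + max(pred depth, succ depth)
theorem addA_height (t : ATree) : ∀ (k c : Int), k ∉ keysT t → t ≠ .nil → 1 ≤ c →
    (addA t k c).2 = 1 + max (predD t k c) (succD t k c) := by
  induction t with
  | nil => intro k c _ hne _; exact absurd rfl hne
  | node v l r ihl ihr =>
    intro k c hk _ hc
    simp only [keysT, List.mem_append, List.mem_cons] at hk
    push_neg at hk
    obtain ⟨hkl, hkv, hkr⟩ := hk
    by_cases hlt : k < v
    · cases l with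
      | nil =>
        rw [addA_lt_nil_snd v r k c hkv hlt, predD_node, succD_node,
          if_neg (by omega : ¬ v < k), if_pos hlt]
        have h2 : predD ATree.nil k (c + 1) = 0 := rfl
        have h3 : succD ATree.nil k (c + 1) = 0 := rfl
        rw [h2, h3]
        simp only [if_pos]
        omega
      | node lv ll lr =>
        rw [addA_lt_node_snd v lv ll lr r k c hkv hlt, predD_node, succD_node,
          if_neg (by omega : ¬ v < k), if_pos hlt]
        rw [ihl k (c + 1) hkl (by simp) (by omega)]
        have hp := predD_ge (ATree.node lv ll lr) k (c + 1) (by omega)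
        have hs := succD_ge (ATree.node lv ll lr) k (c + 1) (by omega)
        have hns := predD_succD_ne (ATree.node lv ll lr) k (c + 1) (by simp) hkl (by omega)
        split_ifs <;> omega
    · have hgt : v < k := by omega
      cases r with
      | nil =>
        rw [addA_gt_nil_snd v l k c hkv hlt, predD_node, succD_node, if_pos hgt, if_neg hlt]
        have h2 : predD ATree.nil k (c + 1) = 0 := rfl
        have h3 : succD ATree.nil k (c + 1) = 0 := rfl
        rw [h2, h3]
        simp only [if_pos]
        omega
      | node rv rl rr =>
        rw [addA_gt_node_snd v rv rl rr l k c hkv hlt, predD_node, succD_node, if_pos hgt,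
          if_neg hlt]
        rw [ihr k (c + 1) hkr (by simp) (by omega)]
        have hp := predD_ge (ATree.node rv rl rr) k (c + 1) (by omega)
        have hs := succD_ge (ATree.node rv rl rr) k (c + 1) (by omega)
        have hns := predD_succD_ne (ATree.node rv rl rr) k (c + 1) (by simp) hkr (by omega)
        split_ifs <;> omega

theorem addA_keys (t : ATree) : ∀ (k c : Int), k ∉ keysT t → t ≠ .nil →
    ∀ x, x ∈ keysT (addA t k c).1 ↔ x = k ∨ x ∈ keysT t := by
  induction t with
  | nil => intro k c _ hne; exact absurd rfl hne
  | node v l r ihl ihr =>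
    intro k c hk _ x
    simp only [keysT, List.mem_append, List.mem_cons] at hk
    push_neg at hk
    obtain ⟨hkl, hkv, hkr⟩ := hk
    by_cases hlt : k < v
    · cases l with
      | nil =>
        rw [addA_lt_nil_fst v r k c hkv hlt]
        simp only [keysT, List.mem_append, List.mem_cons, List.not_mem_nil]
        tauto
      | node lv ll lr =>
        rw [addA_lt_node_fst v lv ll lr r k c hkv hlt]
        have ih := ihl k (c + 1) hkl (by simp) x
        simp only [keysT, List.mem_append, List.mem_cons] at ih ⊢
        rw [ih]
        tauto
    · cases r with
      | nil =>
        rw [addA_gt_nil_fst v l k c hkv hlt]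
        simp only [keysT, List.mem_append, List.mem_cons, List.not_mem_nil]
        tauto
      | node rv rl rr =>
        rw [addA_gt_node_fst v rv rl rr l k c hkv hlt]
        have ih := ihr k (c + 1) hkr (by simp) x
        simp only [keysT, List.mem_append, List.mem_cons] at ih ⊢
        rw [ih]
        tauto

theorem addA_depthIn (t : ATree) : ∀ (k c : Int), k ∉ keysT t → t ≠ .nil →
    ∀ x, depthIn (addA t k c).1 x c = if x = k then some ((addA t k c).2) else depthIn t x c := by
  induction t with
  | nil => intro k c _ hne; exact absurd rfl hne
  | node v l r ihl ihr =>
    intro k c hk _ x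
    simp only [keysT, List.mem_append, List.mem_cons] at hk
    push_neg at hk
    obtain ⟨hkl, hkv, hkr⟩ := hk
    by_cases hlt : k < v
    · cases l with
      | nil =>
        rw [addA_lt_nil_fst v r k c hkv hlt, addA_lt_nil_snd v r k c hkv hlt]
        simp only [depthIn_node, depthIn_nil]
        split_ifs <;> first | rfl | (exfalso; omega)
      | node lv ll lr =>
        have ih := ihl k (c + 1) hkl (by simp)
        rw [addA_lt_node_fst v lv ll lr r k c hkv hlt, addA_lt_node_snd v lv ll lr r k c hkv hlt]
        rw [depthIn_node, depthIn_node]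
        by_cases hxk : x = k
        · rw [if_pos hxk]
          simp only [if_neg (by omega : ¬ x = v), if_pos (by omega : x < v)]
          rw [ih x, if_pos hxk]
        · rw [if_neg hxk]
          by_cases hxv : x = v
          · simp only [if_pos hxv]
          · simp only [if_neg hxv]
            by_cases hxlt : x < v
            · simp only [if_pos hxlt]
              rw [ih x, if_neg hxk]
            · simp only [if_neg hxlt]
    · cases r with
      | nil =>
        rw [addA_gt_nil_fst v l k c hkv hlt, addA_gt_nil_snd v l k c hkv hlt]
        simp only [depthIn_node, depthIn_nil]
        split_ifs <;> first | rfl | (exfalso; omega)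
      | node rv rl rr =>
        have ih := ihr k (c + 1) hkr (by simp)
        rw [addA_gt_node_fst v rv rl rr l k c hkv hlt, addA_gt_node_snd v rv rl rr l k c hkv hlt]
        rw [depthIn_node, depthIn_node]
        by_cases hxk : x = k
        · rw [if_pos hxk]
          simp only [if_neg (by omega : ¬ x = v), if_neg (by omega : ¬ x < v)]
          rw [ih x, if_pos hxk]
        · rw [if_neg hxk]
          by_cases hxv : x = v
          · simp only [if_pos hxv]
          · simp only [if_neg hxv]
            by_cases hxlt : x < v
            · simp only [if_pos hxlt]
            · simp only [if_neg hxlt]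
              rw [ih x, if_neg hxk]

theorem addA_bst (t : ATree) : ∀ (lo hi : Option Int) (k c : Int), BST lo hi t → LB lo k → UB hi k →
    BST lo hi (addA t k c).1 := by
  induction t with
  | nil => intro lo hi k c _ _ _; trivial
  | node v l r ihl ihr =>
    intro lo hi k c hb hlbk hubk
    obtain ⟨hlb, hub, hbl, hbr⟩ := hb
    by_cases hkv : k = v
    · rw [addA.eq_def]
      simp only [if_pos hkv]
      exact ⟨hlb, hub, hbl, hbr⟩
    · by_cases hlt : k < v
      · cases l with
        | nil =>
          rw [addA_lt_nil_fst v r k c hkv hlt]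
          exact ⟨hlb, hub, ⟨hlbk, hlt, True.intro, True.intro⟩, hbr⟩
        | node lv ll lr =>
          rw [addA_lt_node_fst v lv ll lr r k c hkv hlt]
          exact ⟨hlb, hub, ihl lo (some v) k (c + 1) hbl hlbk hlt, hbr⟩
      · cases r with
        | nil =>
          rw [addA_gt_nil_fst v l k c hkv hlt]
          exact ⟨hlb, hub, hbl, (by omega : v < k), hubk, True.intro, True.intro⟩
        | node rv rl rr =>
          rw [addA_gt_node_fst v rv rl rr l k c hkv hlt]
          exact ⟨hlb, hub, hbl, ihr (some v) hi k (c + 1) hbr (by omega : v < k) hubk⟩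

theorem predD_zero (t : ATree) : ∀ (k c : Int), (∀ x ∈ keysT t, ¬ x < k) → predD t k c = 0 := by
  induction t with
  | nil => intro k c _; rfl
  | node v l r ihl ihr =>
    intro k c h
    have hv : ¬ v < k := h v (by simp [keysT])
    rw [predD_node, if_neg hv]
    exact ihl k (c + 1) (fun x hx => h x (by simp [keysT, hx]))

theorem succD_zero (t : ATree) : ∀ (k c : Int), (∀ x ∈ keysT t, ¬ k < x) → succD t k c = 0 := by
  induction t with
  | nil => intro k c _; rfl
  | node v l r ihl ihr =>
    intro k c h
    have hv : ¬ k < v := h v (by simp [keysT])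
    rw [succD_node, if_neg hv]
    exact ihr k (c + 1) (fun x hx => h x (by simp [keysT, hx]))

theorem predD_eq (t : ATree) : ∀ (lo hi : Option Int) (k p c : Int), BST lo hi t → 1 ≤ c →
    p ∈ keysT t → p < k → (∀ y ∈ keysT t, y < k → y ≤ p) →
    predD t k c = (depthIn t p c).getD 0 := by
  induction t with
  | nil => intro lo hi k p c _ _ hp _ _; simp [keysT] at hp
  | node v l r ihl ihr =>
    intro lo hi k p c hb hc hp hpk hmax
    obtain ⟨hlb, hub, hbl, hbr⟩ := hb
    by_cases hvk : v < k
    · have hvp : v ≤ p := hmax v (by simp [keysT]) hvk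
      rw [predD_node, if_pos hvk]
      by_cases hpv : p = v
      · have hzero : predD r k (c + 1) = 0 := by
          apply predD_zero
          intro y hy hyk
          have h1 := bst_mem_lb r (some v) hi hbr y hy
          simp only [LB] at h1
          have := hmax y (by simp [keysT, hy]) hyk
          omega
        rw [hzero, if_pos rfl, depthIn_node, if_pos hpv]
        rfl
      · have hvp' : v < p := by omega
        have hpr : p ∈ keysT r := by
          simp only [keysT, List.mem_append, List.mem_cons] at hp
          rcases hp with h | h | h
          · have := bst_mem_ub l lo (some v) hbl p h
            simp only [UB] at this
            omega
          · omega
          · exact h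
        have ih := ihr (some v) hi k p (c + 1) hbr (by omega) hpr hpk
          (fun y hy hyk => hmax y (by simp [keysT, hy]) hyk)
        obtain ⟨dv, hdv, hge⟩ := depthIn_mem r (some v) hi p (c + 1) hbr hpr
        rw [ih, hdv]
        simp only [Option.getD_some]
        rw [if_neg (by omega : ¬ dv = 0), depthIn_node, if_neg (by omega : ¬ p = v),
          if_neg (by omega : ¬ p < v), hdv]
        rfl
    · have hpv : ¬ p = v := by omega
      have hplt : p < v := by omega
      rw [predD_node, if_neg hvk]
      have hpl : p ∈ keysT l := by
        simp only [keysT, List.mem_append, List.mem_cons] at hp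
        rcases hp with h | h | h
        · exact h
        · omega
        · have := bst_mem_lb r (some v) hi hbr p h
          simp only [LB] at this
          omega
      have ih := ihl lo (some v) k p (c + 1) hbl (by omega) hpl hpk
        (fun y hy hyk => hmax y (by simp [keysT, hy]) hyk)
      rw [ih, depthIn_node, if_neg hpv, if_pos hplt]

theorem succD_eq (t : ATree) : ∀ (lo hi : Option Int) (k s c : Int), BST lo hi t → 1 ≤ c →
    s ∈ keysT t → k < s → (∀ y ∈ keysT t, k < y → s ≤ y) →
    succD t k c = (depthIn t s c).getD 0 := by
  induction t with
  | nil => intro lo hi k s c _ _ hs _ _; simp [keysT] at hs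
  | node v l r ihl ihr =>
    intro lo hi k s c hb hc hs hks hmin
    obtain ⟨hlb, hub, hbl, hbr⟩ := hb
    by_cases hkv : k < v
    · have hsv : s ≤ v := hmin v (by simp [keysT]) hkv
      rw [succD_node, if_pos hkv]
      by_cases hsv' : s = v
      · have hzero : succD l k (c + 1) = 0 := by
          apply succD_zero
          intro y hy hky
          have h1 := bst_mem_ub l lo (some v) hbl y hy
          simp only [UB] at h1
          have := hmin y (by simp [keysT, hy]) hky
          omega
        rw [hzero, if_pos rfl, depthIn_node, if_pos hsv']
        rfl
      · have hsv'' : s < v := by omega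
        have hsl : s ∈ keysT l := by
          simp only [keysT, List.mem_append, List.mem_cons] at hs
          rcases hs with h | h | h
          · exact h
          · omega
          · have := bst_mem_lb r (some v) hi hbr s h
            simp only [LB] at this
            omega
        have ih := ihl lo (some v) k s (c + 1) hbl (by omega) hsl hks
          (fun y hy hky => hmin y (by simp [keysT, hy]) hky)
        obtain ⟨dv, hdv, hge⟩ := depthIn_mem l lo (some v) s (c + 1) hbl hsl
        rw [ih, hdv]
        simp only [Option.getD_some]
        rw [if_neg (by omega : ¬ dv = 0), depthIn_node, if_neg (by omega : ¬ s = v),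
          if_pos hsv'', hdv]
        rfl
    · have hsv : ¬ s = v := by omega
      rw [succD_node, if_neg hkv]
      have hsr : s ∈ keysT r := by
        simp only [keysT, List.mem_append, List.mem_cons] at hs
        rcases hs with h | h | h
        · have := bst_mem_ub l lo (some v) hbl s h
          simp only [UB] at this
          omega
        · omega
        · exact h
      have ih := ihr (some v) hi k s (c + 1) hbr (by omega) hsr hks
        (fun y hy hky => hmin y (by simp [keysT, hy]) hky)
      rw [ih, depthIn_node, if_neg hsv, if_neg (by omega : ¬ s < v)]

theorem bisect_spec (keys : List Int) (x : Int) (hsort : keys.Pairwise (· < ·)) :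
    ∀ (n : Nat) (lo hi : Int), (hi - lo).toNat = n → 0 ≤ lo → lo ≤ hi → hi ≤ (keys.length : Int) →
    (∀ (j : Nat) (hj : j < keys.length), (j : Int) < lo → keys[j] < x) →
    (∀ (j : Nat) (hj : j < keys.length), hi ≤ (j : Int) → ¬ keys[j] < x) →
    0 ≤ bisectB keys x lo hi ∧ bisectB keys x lo hi ≤ (keys.length : Int) ∧
    (∀ (j : Nat) (hj : j < keys.length), (j : Int) < bisectB keys x lo hi → keys[j] < x) ∧
    (∀ (j : Nat) (hj : j < keys.length), bisectB keys x lo hi ≤ (j : Int) → ¬ keys[j] < x) := by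
  intro n
  induction n using Nat.strong_induction_on with
  | _ n ihn =>
    intro lo hi hn h0 hlh hhl hpre hpost
    rw [bisectB]
    by_cases hlt : lo < hi
    · rw [dif_pos hlt]
      have hmb := PySem.Int.floordiv_two_mid_bounds (le_of_lt hlt)
      have hmlt : PySem.Int.floordiv (lo + hi) 2 < hi := by
        rw [PySem.Int.floordiv_lt_iff_lt_mul (by omega : (0:Int) < 2)]
        omega
      set mid := PySem.Int.floordiv (lo + hi) 2 with hmiddef
      have hmtn : mid.toNat < keys.length := by omega
      have hget : PySem.List.pyGetD keys mid 0 = keys[mid.toNat] :=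
        PySem.List.pyGetD_eq_getElem keys 0 (by omega) (by omega)
      by_cases hcmp : keys[mid.toNat]'hmtn < x
      · rw [if_pos (by rw [hget]; exact hcmp)]
        refine ihn (hi - (mid + 1)).toNat (by omega) (mid + 1) hi rfl (by omega) (by omega)
          hhl ?_ hpost
        intro j hj hjlt
        rcases Nat.lt_or_ge j mid.toNat with hx1 | hx1
        · have := List.pairwise_iff_getElem.mp hsort j mid.toNat hj hmtn hx1
          omega
        · have hj' : j = mid.toNat := by omega
          subst hj'
          exact hcmp
      · rw [if_neg (by rw [hget]; exact hcmp)]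
        refine ihn (mid - lo).toNat (by omega) lo mid rfl h0 (by omega) (by omega) hpre ?_
        intro j hj hge
        rcases Nat.eq_or_lt_of_le (show mid.toNat ≤ j by omega) with hx1 | hx1
        · have hj' : j = mid.toNat := by omega
          subst hj'
          exact hcmp
        · have := List.pairwise_iff_getElem.mp hsort mid.toNat j hmtn hj hx1
          omega
    · rw [dif_neg hlt]
      exact ⟨h0, by omega, fun j hj hjlt => hpre j hj hjlt, fun j hj hge => hpost j hj (by omega)⟩

theorem loopA_cons (item : Int) (rest : List Int) (t : ATree) (hs : List Int) :
    loopA (item :: rest) t hs =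
      if item = 0 then hs
      else loopA rest (addA t item 1).1
        (if (addA t item 1).2 ≠ -1 then hs ++ [(addA t item 1).2] else hs) := rfl

theorem loopB_cons (item : Int) (rest : List Int) (d : PySem.Dict Int Int) (keys hs : List Int) :
    loopB (item :: rest) d keys hs =
      if item = 0 then hs
      else if d.contains item then loopB rest d keys hs
      else loopB rest
        (d.insert item (1 + max
          (if 0 < bisectB keys item 0 (keys.length : Int) then
            d.getD (PySem.List.pyGetD keys (bisectB keys item 0 (keys.length : Int) - 1) 0) 0
          else 0)
          (if bisectB keys item 0 (keys.length : Int) < (keys.length : Int) then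
            d.getD (PySem.List.pyGetD keys (bisectB keys item 0 (keys.length : Int)) 0) 0
          else 0)))
        (PySem.List.insert keys (bisectB keys item 0 (keys.length : Int)) item)
        (hs ++ [1 + max
          (if 0 < bisectB keys item 0 (keys.length : Int) then
            d.getD (PySem.List.pyGetD keys (bisectB keys item 0 (keys.length : Int) - 1) 0) 0
          else 0)
          (if bisectB keys item 0 (keys.length : Int) < (keys.length : Int) then
            d.getD (PySem.List.pyGetD keys (bisectB keys item 0 (keys.length : Int)) 0) 0
          else 0)]) := rfl

theorem loop_eq : ∀ (rest : List Int) (t : ATree) (d : PySem.Dict Int Int) (keys hs : List Int),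
    BST none none t → t ≠ .nil → keys.Pairwise (· < ·) →
    (∀ x, x ∈ keys ↔ x ∈ keysT t) →
    (∀ x, d.get? x = depthIn t x 1) →
    loopA rest t hs = loopB rest d keys hs := by
  intro rest
  induction rest with
  | nil => intro t d keys hs _ _ _ _ _; rfl
  | cons item rest ih =>
    intro t d keys hs hb hne hsort hmem hd
    rw [loopA_cons, loopB_cons]
    by_cases h0 : item = 0
    · rw [if_pos h0, if_pos h0]
    · rw [if_neg h0, if_neg h0]
      by_cases hmi : item ∈ keysT t
      · have hcont : d.contains item = true := by
          rw [PySem.Dict.contains_eq_isSome_get?, hd item]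
          obtain ⟨dv, hdv, _⟩ := depthIn_mem t none none item 1 hb hmi
          rw [hdv]
          rfl
        rw [if_pos hcont]
        have hfound := addA_found t none none item 1 hb hmi
        have hsnd : (addA t item 1).2 = -1 := by rw [hfound]
        have hfst : (addA t item 1).1 = t := by rw [hfound]
        simp only [hsnd, hfst]
        rw [if_neg (show ¬ ((-1:Int) ≠ -1) by omega)]
        exact ih t d keys hs hb hne hsort hmem hd
      · have hcontf : d.contains item = false := by
          rw [PySem.Dict.contains_eq_isSome_get?, hd item, depthIn_notmem t item 1 hmi]
          rfl
        rw [if_neg (show ¬ (d.contains item = true) by simp [hcontf])]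
        set i := bisectB keys item 0 (keys.length : Int) with hidef
        have hspec := bisect_spec keys item hsort ((keys.length : Int) - 0).toNat 0
          (keys.length : Int) rfl le_rfl (by omega) le_rfl
          (fun j hj hjlt => absurd hjlt (by omega))
          (fun j hj hge => absurd hge (by omega))
        obtain ⟨hi0, hilen, hlow, hhigh⟩ := hspec
        have hhigh' : ∀ (j : Nat) (hj : j < keys.length), i ≤ (j : Int) → item < keys[j] := by
          intro j hj hge
          have h1 := hhigh j hj hge
          have h2 : keys[j] ≠ item := by
            intro he
            exact hmi (he ▸ (hmem keys[j]).mp (List.getElem_mem hj))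
          omega
        have hdl : (if 0 < i then d.getD (PySem.List.pyGetD keys (i - 1) 0) 0 else 0) =
            predD t item 1 := by
          by_cases hip : 0 < i
          · rw [if_pos hip]
            have hgeteq : PySem.List.pyGetD keys (i - 1) 0 = keys[(i - 1).toNat]'(by omega) :=
              PySem.List.pyGetD_eq_getElem keys 0 (by omega) (by omega)
            rw [hgeteq]
            have hpk : keys[(i - 1).toNat]'(by omega) < item := hlow (i - 1).toNat (by omega) (by omega)
            have hpmem : keys[(i - 1).toNat]'(by omega) ∈ keysT t :=
              (hmem _).mp (List.getElem_mem _)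
            have hmax : ∀ y ∈ keysT t, y < item → y ≤ keys[(i - 1).toNat]'(by omega) := by
              intro y hy hylt
              obtain ⟨j, hj, hyj⟩ := List.mem_iff_getElem.mp ((hmem y).mpr hy)
              by_cases hji : (j : Int) < i
              · rcases Nat.lt_or_ge j (i - 1).toNat with hlt3 | hge3
                · have := List.pairwise_iff_getElem.mp hsort j (i - 1).toNat hj (by omega) hlt3
                  omega
                · have hj' : j = (i - 1).toNat := by omega
                  subst hj'
                  omega
              · have := hhigh' j hj (by omega)
                omega
            rw [PySem.Dict.getD_eq_get?_getD, hd _,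
              predD_eq t none none item (keys[(i - 1).toNat]'(by omega)) 1 hb le_rfl hpmem hpk hmax]
          · rw [if_neg hip]
            symm
            apply predD_zero
            intro y hy hylt
            obtain ⟨j, hj, hyj⟩ := List.mem_iff_getElem.mp ((hmem y).mpr hy)
            have := hhigh' j hj (by omega)
            omega
        have hdr : (if i < (keys.length : Int) then d.getD (PySem.List.pyGetD keys i 0) 0 else 0) =
            succD t item 1 := by
          by_cases hip : i < (keys.length : Int)
          · rw [if_pos hip]
            have hgeteq : PySem.List.pyGetD keys i 0 = keys[i.toNat]'(by omega) :=
              PySem.List.pyGetD_eq_getElem keys 0 (by omega) (by omega)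
            rw [hgeteq]
            have hks : item < keys[i.toNat]'(by omega) := hhigh' i.toNat (by omega) (by omega)
            have hsmem : keys[i.toNat]'(by omega) ∈ keysT t := (hmem _).mp (List.getElem_mem _)
            have hmin : ∀ y ∈ keysT t, item < y → keys[i.toNat]'(by omega) ≤ y := by
              intro y hy hygt
              obtain ⟨j, hj, hyj⟩ := List.mem_iff_getElem.mp ((hmem y).mpr hy)
              by_cases hji : (j : Int) < i
              · have := hlow j hj hji
                omega
              · rcases Nat.eq_or_lt_of_le (show i.toNat ≤ j by omega) with he | hlt3
                · have hj' : j = i.toNat := by omega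
                  subst hj'
                  omega
                · have := List.pairwise_iff_getElem.mp hsort i.toNat j (by omega) hj hlt3
                  omega
            rw [PySem.Dict.getD_eq_get?_getD, hd _,
              succD_eq t none none item (keys[i.toNat]'(by omega)) 1 hb le_rfl hsmem hks hmin]
          · rw [if_neg hip]
            symm
            apply succD_zero
            intro y hy hygt
            obtain ⟨j, hj, hyj⟩ := List.mem_iff_getElem.mp ((hmem y).mpr hy)
            have := hlow j hj (by omega)
            omega
        have hh := addA_height t item 1 hmi hne le_rfl
        have hp1 := predD_ge t item 1 le_rfl
        have hs1 := succD_ge t item 1 le_rfl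
        have hne2 : (addA t item 1).2 ≠ -1 := by
          rw [hh]
          omega
        rw [if_pos hne2, hdl, hdr, ← hh]
        have hins : PySem.List.insert keys i item =
            keys.take i.toNat ++ item :: keys.drop i.toNat := by
          have h1 : i = ((i.toNat : Nat) : Int) := by omega
          conv_lhs => rw [h1]
          exact PySem.List.insert_natCast keys i.toNat item (by omega)
        have hb' := addA_bst t none none item 1 hb True.intro True.intro
        have hitem : item ∈ keysT (addA t item 1).1 :=
          (addA_keys t item 1 hmi hne item).mpr (Or.inl rfl)
        have hne' : (addA t item 1).1 ≠ .nil := by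
          intro hnil
          rw [hnil] at hitem
          simp [keysT] at hitem
        have hsort' : (PySem.List.insert keys i item).Pairwise (· < ·) := by
          rw [hins]
          refine List.pairwise_append.mpr ⟨List.Pairwise.sublist (List.take_sublist _ _) hsort,
            List.pairwise_cons.mpr ⟨?_, List.Pairwise.sublist (List.drop_sublist _ _) hsort⟩, ?_⟩
          · intro b hbmem
            obtain ⟨j, hj, hbj⟩ := List.mem_iff_getElem.mp hbmem
            rw [List.getElem_drop] at hbj
            have hlen : i.toNat + j < keys.length := by simp at hj; omega
            have := hhigh' (i.toNat + j) hlen (by omega)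
            omega
          · intro a hamem b hbmem
            obtain ⟨j1, hj1, haj⟩ := List.mem_iff_getElem.mp hamem
            rw [List.getElem_take] at haj
            have hlen1 : j1 < keys.length := by simp at hj1; omega
            have hja : keys[j1] < item := hlow j1 hlen1 (by simp at hj1; omega)
            rcases List.mem_cons.mp hbmem with hbeq | hbmem2
            · omega
            · obtain ⟨j2, hj2, hbj⟩ := List.mem_iff_getElem.mp hbmem2
              rw [List.getElem_drop] at hbj
              have hlen2 : i.toNat + j2 < keys.length := by simp at hj2; omega
              have := hhigh' (i.toNat + j2) hlen2 (by omega)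
              omega
        have hmem' : ∀ y, y ∈ PySem.List.insert keys i item ↔ y ∈ keysT (addA t item 1).1 := by
          intro y
          rw [hins, addA_keys t item 1 hmi hne y]
          have hsplit : (y ∈ keys.take i.toNat ∨ y ∈ keys.drop i.toNat) ↔ y ∈ keysT t := by
            rw [← List.mem_append, List.take_append_drop]
            exact hmem y
          simp only [List.mem_append, List.mem_cons]
          tauto
        have hd' : ∀ y, (d.insert item (addA t item 1).2).get? y =
            depthIn (addA t item 1).1 y 1 := by
          intro y
          rw [PySem.Dict.get?_insert, addA_depthIn t item 1 hmi hne y]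
          by_cases hyi : y = item
          · rw [if_pos hyi, if_pos hyi]
          · rw [if_neg hyi, if_neg hyi, hd y]
        exact ih _ _ _ _ hb' hne' hsort' hmem' hd' 

-- ===== VERDICT (by name: the statement is the Claim_ definition above) =====
theorem tree_heights_spec : Claim_equal_tree_heights := by
  intro items hdom hpre
  unfold Spec_tree_heights
  cases items with
  | nil => exact absurd rfl hpre
  | cons x rest =>
    show loopA (x :: rest) (.node x .nil .nil) [1] =
      loopB (x :: rest) (PySem.Dict.empty.insert x 1) [x] [1]
    apply loop_eq
    · exact ⟨True.intro, True.intro, True.intro, True.intro⟩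
    · simp
    · exact List.pairwise_singleton _ _
    · intro y
      simp [keysT]
    · intro y
      rw [PySem.Dict.get?_insert, depthIn_node]
      by_cases hyx : y = x
      · rw [if_pos hyx, if_pos hyx]
      · rw [if_neg hyx, if_neg hyx, PySem.Dict.get?_empty]
        split_ifs <;> rfl
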